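-- pv_equiv track=rewrite | github.com/DoreenP8387631eggy/csv-surgeon | csv_surgeon/joiner.py | left_join
-- ===== SOURCE A (Python) =====
-- from typing import Dict, Generator, Iterable, Optional
--
-- def _index_rows(rows: Iterable[Dict[str, str]], key: str) -> Dict[str, Dict[str, str]]:
--     """Load rows from an iterable into a dict keyed by the join column value."""
--     index: Dict[str, Dict[str, str]] = {}
--     for row in rows:
--         k = row.get(key, "")
--         if k:
--             index[k] = row
--     return index
--
-- def left_join(
--     left_rows: Iterable[Dict[str, str]],
--     right_rows: Iterable[Dict[str, str]],
--     left_key: str,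
--     right_key: Optional[str] = None,
--     right_prefix: str = "right_",
-- ) -> Generator[Dict[str, str], None, None]:
--     """Yield all left rows, enriched with right data where the key matches."""
--     if right_key is None:
--         right_key = left_key
--
--     right_index = _index_rows(right_rows, right_key)
--
--     for left_row in left_rows:
--         k = left_row.get(left_key, "")
--         merged = dict(left_row)
--         if k in right_index:
--             for col, val in right_index[k].items():
--                 if col == right_key:
--                     continue
--                 out_col = col if col not in merged else f"{right_prefix}{col}"
--                 merged[out_col] = val
--         yield merged
-- ===== SOURCE B (Python) =====
-- def left_join(
--     left_rows,
--     right_rows,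
--     left_key,
--     right_key=None,
--     right_prefix="right_",
-- ):
--     """Yield all left rows, enriched with the LAST matching right row (no index)."""
--     if right_key is None:
--         right_key = left_key
--     right_list = list(right_rows)
--     for left_row in left_rows:
--         k = left_row.get(left_key, "")
--         matched = None
--         if k:
--             for r in right_list:
--                 if r.get(right_key, "") == k:
--                     matched = r
--         merged = dict(left_row)
--         if matched is not None:
--             for col, val in matched.items():
--                 if col == right_key:
--                     continue
--                 out_col = col if col not in merged else f"{right_prefix}{col}"
--                 merged[out_col] = val
--         yield merged
-- ===== Notes on version B (the rewrite author's own statement) =====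
-- stated objective: alternative
-- what changed: B drops the _index_rows dict index entirely and, for each left row with a truthy key, linearly scans the materialized right list keeping the last matching right row, then merges it the same way.
import Mathlib
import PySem

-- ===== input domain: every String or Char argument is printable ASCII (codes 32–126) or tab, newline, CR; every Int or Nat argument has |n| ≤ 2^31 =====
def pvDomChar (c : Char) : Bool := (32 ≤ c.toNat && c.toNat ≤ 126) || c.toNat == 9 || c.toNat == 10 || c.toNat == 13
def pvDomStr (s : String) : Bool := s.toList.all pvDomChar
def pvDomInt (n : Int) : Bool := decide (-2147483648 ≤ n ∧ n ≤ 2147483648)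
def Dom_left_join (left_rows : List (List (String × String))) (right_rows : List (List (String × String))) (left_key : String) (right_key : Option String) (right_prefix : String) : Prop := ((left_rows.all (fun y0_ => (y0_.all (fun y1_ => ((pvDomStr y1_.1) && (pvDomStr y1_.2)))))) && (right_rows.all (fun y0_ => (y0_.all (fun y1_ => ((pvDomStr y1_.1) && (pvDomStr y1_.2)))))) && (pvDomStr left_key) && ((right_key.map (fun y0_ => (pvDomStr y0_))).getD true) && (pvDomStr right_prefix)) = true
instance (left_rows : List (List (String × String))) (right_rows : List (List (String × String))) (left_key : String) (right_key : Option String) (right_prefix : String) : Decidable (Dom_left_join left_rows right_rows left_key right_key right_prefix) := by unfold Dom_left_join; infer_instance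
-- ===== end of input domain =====

-- B drops A's dict index and instead scans the materialized right list per left row,
-- keeping the last truthy-key match (alternative decomposition, same exact behaviour).
-- ===== PORT A =====
-- _index_rows: index[k] = row for each row with truthy key value (last wins)
def index_rows (rows : List (List (String × String))) (key : String) : PySem.Dict String (List (String × String)) :=
  rows.foldl (fun index row =>
    let k := (PySem.Dict.mk row).getD key ""
    if k ≠ "" then index.insert k row else index) PySem.Dict.empty

def left_join (left_rows : List (List (String × String))) (right_rows : List (List (String × String))) (left_key : String) (right_key : Option String) (right_prefix : String) : List (List (String × String)) :=
  let rk := right_key.getD left_key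
  let right_index := index_rows right_rows rk
  left_rows.map (fun left_row =>
    let k := (PySem.Dict.mk left_row).getD left_key ""
    let merged := PySem.Dict.mk left_row
    let merged :=
      if right_index.contains k then
        (right_index.getD k []).foldl (fun m cv =>
          if cv.1 == rk then m
          else m.insert (if m.contains cv.1 then right_prefix ++ cv.1 else cv.1) cv.2) merged
      else merged
    merged.items)

-- ===== PORT B =====
-- inner 'for r in right_list' loop of Source B: keep the LAST right row whose key value equals k
def last_match (right_list : List (List (String × String))) (rk k : String) : Option (List (String × String)) :=
  right_list.foldl (fun matched r =>
    if (PySem.Dict.mk r).getD rk "" == k then some r else matched) none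

-- the 'for col, val in matched.items()' merge loop of Source B, as structural recursion
def merge_cols (rk pre : String) : List (String × String) → PySem.Dict String String → PySem.Dict String String
  | [], merged => merged
  | (col, val) :: rest, merged =>
      if col == rk then merge_cols rk pre rest merged
      else merge_cols rk pre rest
        (merged.insert (if merged.contains col then pre ++ col else col) val)

def left_join_alt (left_rows : List (List (String × String))) (right_rows : List (List (String × String))) (left_key : String) (right_key : Option String) (right_prefix : String) : List (List (String × String)) :=
  let rk := right_key.getD left_key
  left_rows.map (fun left_row =>
    let k := (PySem.Dict.mk left_row).getD left_key ""
    let matched := if k ≠ "" then last_match right_rows rk k else none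
    let merged := PySem.Dict.mk left_row
    (match matched with
     | some r => merge_cols rk right_prefix r merged
     | none => merged).items)

-- ===== PRECONDITION & SPEC =====
def Spec_left_join (left_rows : List (List (String × String))) (right_rows : List (List (String × String))) (left_key : String) (right_key : Option String) (right_prefix : String) (out : List (List (String × String))) : Prop := out = left_join_alt left_rows right_rows left_key right_key right_prefix
instance (left_rows : List (List (String × String))) (right_rows : List (List (String × String))) (left_key : String) (right_key : Option String) (right_prefix : String) (out : List (List (String × String))) : Decidable (Spec_left_join left_rows right_rows left_key right_key right_prefix out) := by unfold Spec_left_join; infer_instance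

-- ===== CLAIM (what is proved, stated in full; the proofs are below) =====
def Claim_equal_left_join : Prop := ∀ (left_rows : List (List (String × String))) (right_rows : List (List (String × String))) (left_key : String) (right_key : Option String) (right_prefix : String), Dom_left_join left_rows right_rows left_key right_key right_prefix → Spec_left_join left_rows right_rows left_key right_key right_prefix (left_join left_rows right_rows left_key right_key right_prefix)

-- ===== LEMMAS AND PROOFS =====

-- ===== VERDICT (by name: the statement is the Claim_ definition above) =====
-- the index lookup of A equals B's last-match scan, for a truthy key k
theorem get?_index_rows_eq_last_match (rows : List (List (String × String))) (rk k : String)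
    (hk : k ≠ "") (d : PySem.Dict String (List (String × String)))
    (acc : Option (List (String × String))) (h : d.get? k = acc) :
    (rows.foldl (fun index row =>
      let kk := (PySem.Dict.mk row).getD rk ""
      if kk ≠ "" then index.insert kk row else index) d).get? k =
    rows.foldl (fun matched r =>
      if (PySem.Dict.mk r).getD rk "" == k then some r else matched) acc := by
  induction rows generalizing d acc with
  | nil => simpa using h
  | cons r rest ih =>
      simp only [List.foldl_cons]
      apply ih
      by_cases hkk : (PySem.Dict.mk r).getD rk "" = k
      · simp [hkk, hk]
      · by_cases hne : (PySem.Dict.mk r).getD rk "" = ""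
        · simp [hne, h, hk]
        · simp [hne, hkk, PySem.Dict.get?_insert, Ne.symm hkk, h]

-- the index never contains the empty key
theorem get?_index_rows_empty (rows : List (List (String × String))) (rk : String)
    (d : PySem.Dict String (List (String × String))) (h : d.get? "" = none) :
    (rows.foldl (fun index row =>
      let kk := (PySem.Dict.mk row).getD rk ""
      if kk ≠ "" then index.insert kk row else index) d).get? "" = none := by
  induction rows generalizing d with
  | nil => simpa using h
  | cons r rest ih =>
      simp only [List.foldl_cons]
      apply ih
      by_cases hne : (PySem.Dict.mk r).getD rk "" = ""
      · simp [hne, h]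
      · simp [hne, PySem.Dict.get?_insert, h, Ne.symm hne]

-- B's recursive merge is A's fold
theorem merge_cols_eq_foldl (rk pre : String) (pairs : List (String × String))
    (m : PySem.Dict String String) :
    merge_cols rk pre pairs m =
    pairs.foldl (fun m cv =>
      if cv.1 == rk then m
      else m.insert (if m.contains cv.1 then pre ++ cv.1 else cv.1) cv.2) m := by
  induction pairs generalizing m with
  | nil => rfl
  | cons cv rest ih =>
      obtain ⟨col, val⟩ := cv
      by_cases hc : col = rk
      · simp [merge_cols, hc, ih]
      · simp [merge_cols, hc, ih]

theorem left_join_spec : Claim_equal_left_join := by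
  intro left_rows right_rows left_key right_key right_prefix _
  unfold Spec_left_join left_join left_join_alt
  apply List.map_congr_left
  intro left_row _
  simp only []
  set rk := right_key.getD left_key with hrk
  set k := (PySem.Dict.mk left_row).getD left_key "" with hk
  by_cases hke : k = ""
  · have hnone : (index_rows right_rows rk).get? k = none := by
      rw [hke]; exact get?_index_rows_empty right_rows rk PySem.Dict.empty (by simp)
    have hc : (index_rows right_rows rk).contains k = false := by
      rw [PySem.Dict.contains_eq_isSome_get?, hnone]; rfl
    rw [hke] at hc
    simp [hc, hke]
  · have hlook : (index_rows right_rows rk).get? k = last_match right_rows rk k :=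
      get?_index_rows_eq_last_match right_rows rk k hke PySem.Dict.empty none (by simp)
    have hc : (index_rows right_rows rk).contains k = (last_match right_rows rk k).isSome := by
      rw [PySem.Dict.contains_eq_isSome_get?, hlook]
    cases hm : last_match right_rows rk k with
    | none => simp [hc, hm, hke]
    | some r =>
        have hd : (index_rows right_rows rk).getD k [] = r :=
          PySem.Dict.getD_of_get?_eq_some _ [] (hlook.trans hm)
        simp [hc, hm, hke, hd, merge_cols_eq_foldl]
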